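-- pv_equiv track=rewrite | github.com/percyfrank/BaekJoonHub_autopush | 백준/Gold/1941. 소문난 칠공주/소문난 칠공주.py | check
-- ===== SOURCE A (Python) =====
-- from collections import deque
--
-- dx = [-1,1,0,0]
--
-- dy = [0,0,-1,1]
--
-- def check(arr):
--     visited = [False] * 7
--     q = deque()
--     q.append(arr[0])
--     visited[0] = True
--
--     while q:
--         x,y = q.popleft()
--         for i in range(4):
--             nx = x + dx[i]
--             ny = y + dy[i]
--             if (nx,ny) in arr:
--                 idx = arr.index((nx,ny))
--                 if not visited[idx]:
--                     visited[idx] = True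
--                     q.append((nx,ny))
--
--     if False in visited:
--         return False
--     else:
--         return True
-- ===== SOURCE B (Python) =====
-- def check(arr):
--     cells = set(arr)
--     if len(arr) != 7 or len(cells) != 7:
--         return False
--     reach = {arr[0]}
--     for _ in range(6):
--         nxt = set(reach)
--         for (x, y) in reach:
--             for nb in ((x - 1, y), (x + 1, y), (x, y - 1), (x, y + 1)):
--                 if nb in cells:
--                     nxt.add(nb)
--         reach = nxt
--     return len(reach) == 7
-- ===== Notes on version B (the rewrite author's own statement) =====
-- stated objective: alternative
-- what changed: Replaces the deque BFS with its 7-slot visited array and repeated arr.index linear scans by an up-front distinctness guard (len/set) followed by six rounds of a set-closure fixpoint over coordinates (enough for 7 cells), returning whether the closure covers all 7 cells.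
-- outside the precondition, e.g. on check([]): A raises IndexError, B returns False
import Mathlib
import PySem

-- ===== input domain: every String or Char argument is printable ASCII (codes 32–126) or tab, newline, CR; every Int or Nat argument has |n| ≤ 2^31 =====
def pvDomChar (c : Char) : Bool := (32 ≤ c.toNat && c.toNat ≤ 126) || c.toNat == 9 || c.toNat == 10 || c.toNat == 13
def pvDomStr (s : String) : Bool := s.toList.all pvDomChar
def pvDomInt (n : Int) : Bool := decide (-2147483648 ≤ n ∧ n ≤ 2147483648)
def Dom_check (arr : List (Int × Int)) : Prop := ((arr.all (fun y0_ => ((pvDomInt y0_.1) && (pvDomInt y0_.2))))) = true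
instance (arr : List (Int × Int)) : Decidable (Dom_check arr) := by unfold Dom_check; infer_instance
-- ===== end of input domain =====

-- B replaces A's deque BFS (7-slot visited array + repeated arr.index scans) by a distinctness
-- guard followed by six rounds of a set-closure fixpoint over coordinates; same return value on Pre_.

-- ===== PORT A =====
def pvDx : List Int := [-1, 1, 0, 0]
def pvDy : List Int := [0, 0, -1, 1]

-- one neighbour step of the inner 'for i in range(4)' body (d = (dx[i], dy[i]))
def pvStepNb (arr : List (Int × Int)) (x y : Int) (st : List Bool × List (Int × Int))
    (d : Int × Int) : List Bool × List (Int × Int) :=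
  let nx := x + d.1
  let ny := y + d.2
  if (nx, ny) ∈ arr then
    match PySem.List.index? arr (nx, ny) with
    | some idx =>
        -- Python reads visited[idx]; inside Pre_ idx < 7 = len(visited), so getD/set are exact
        if st.1.getD idx false then st
        else (st.1.set idx true, st.2 ++ [(nx, ny)])
    | none => st
  else st

-- the 'while q' loop; fuel 40 ≥ 5*7+1 > the measure 5*(#False in visited)+len(q), which strictly
-- decreases each iteration inside Pre_, so the fuel is never exhausted there (proved below)
def pvBfs (arr : List (Int × Int)) : Nat → List Bool → List (Int × Int) → List Bool
  | 0, vs, _ => vs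
  | Nat.succ f, vs, q =>
    match q with
    | [] => vs
    | (x, y) :: rest =>
        let st := (List.zip pvDx pvDy).foldl (pvStepNb arr x y) (vs, rest)
        pvBfs arr f st.1 st.2

def check (arr : List (Int × Int)) : Bool :=
  match arr with
  | [] => false  -- Python: arr[0] raises IndexError; excluded by Pre_check
  | c0 :: _ =>
      let vs0 := (List.replicate 7 false).set 0 true
      let vsF := pvBfs arr 40 vs0 [c0]
      !(vsF.contains false)

-- ===== PORT B =====
def pvNbrs (x y : Int) : List (Int × Int) := [(x - 1, y), (x + 1, y), (x, y - 1), (x, y + 1)]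

-- one round: nxt = set(reach); for (x,y) in reach: for nb in nbrs: if nb in cells: nxt.add(nb)
def pvRound (cells reach : PySem.Set (Int × Int)) : PySem.Set (Int × Int) :=
  reach.foldl
    (fun nxt c =>
      (pvNbrs c.1 c.2).foldl
        (fun nxt nb => if PySem.Set.contains cells nb then PySem.Set.add nxt nb else nxt) nxt)
    (PySem.Set.ofList reach)

def check_alt (arr : List (Int × Int)) : Bool :=
  let cells : PySem.Set (Int × Int) := PySem.Set.ofList arr
  if arr.length ≠ 7 ∨ cells.length ≠ 7 then false
  else
    match arr with
    | [] => false  -- unreachable: length is 7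
    | c0 :: _ =>
        let reach := (List.range 6).foldl (fun r _ => pvRound cells r) (PySem.Set.ofList [c0])
        reach.length == 7

-- ===== PRECONDITION & SPEC =====
-- Pre_ excludes the empty list (arr[0] raises IndexError) and lists longer than 7: there A's
-- hard-coded 7-slot visited array either raises IndexError (arr.index ≥ 7 reached) or yields an
-- accidental truncated-to-7 semantics, while B commits to the intended exactly-7-cells reading.
def Pre_check (arr : List (Int × Int)) : Prop := arr ≠ [] ∧ arr.length ≤ 7
instance (arr : List (Int × Int)) : Decidable (Pre_check arr) := by unfold Pre_check; infer_instance

def pvWitness_check : (List (Int × Int)) :=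
  [(0, 0), (0, 1), (0, 2), (0, 3), (1, 3), (1, 4), (2, 4)]

def Spec_check (arr : List (Int × Int)) (out : Bool) : Prop := out = check_alt arr
instance (arr : List (Int × Int)) (out : Bool) : Decidable (Spec_check arr out) := by
  unfold Spec_check; infer_instance

-- ===== CLAIM (what is proved, stated in full; the proofs are below) =====
def Claim_equal_check : Prop :=
  ∀ (arr : List (Int × Int)), Dom_check arr → Pre_check arr → Spec_check arr (check arr)

-- ===== LEMMAS AND PROOFS =====

-- the spec relation: one grid step from c to d staying inside arr
def PvStep (arr : List (Int × Int)) (c d : Int × Int) : Prop :=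
  d ∈ pvNbrs c.1 c.2 ∧ d ∈ arr

def PvReach (arr : List (Int × Int)) (c0 c : Int × Int) : Prop :=
  Relation.ReflTransGen (PvStep arr) c0 c


-- membership in the inner neighbour fold of pvRound
theorem pv_mem_inner (cells : PySem.Set (Int × Int)) (nbs : List (Int × Int)) :
    ∀ (nxt : PySem.Set (Int × Int)) (z : Int × Int),
      (z ∈ nbs.foldl
          (fun nxt nb => if PySem.Set.contains cells nb then PySem.Set.add nxt nb else nxt) nxt
        ↔ z ∈ nxt ∨ (z ∈ nbs ∧ z ∈ cells)) := by
  induction nbs with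
  | nil => simp
  | cons a l ih =>
    intro nxt z
    by_cases ha : PySem.Set.contains cells a = true
    · have hac : a ∈ cells := (PySem.Set.contains_iff cells a).1 ha
      simp only [List.foldl_cons, ha, if_pos, ih, PySem.Set.mem_add, List.mem_cons]
      constructor
      · rintro (⟨h | rfl⟩ | ⟨h1, h2⟩)
        · exact Or.inl h
        · exact Or.inr ⟨Or.inl rfl, hac⟩
        · exact Or.inr ⟨Or.inr h1, h2⟩
      · rintro (h | ⟨(rfl | h1), h2⟩)
        · exact Or.inl (Or.inl h)
        · exact Or.inl (Or.inr rfl)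
        · exact Or.inr ⟨h1, h2⟩
    · have hac : z = a → z ∉ cells := by
        rintro rfl hz
        exact ha ((PySem.Set.contains_iff cells z).2 hz)
      simp only [List.foldl_cons, ha, ih, List.mem_cons]
      constructor
      · rintro (h | ⟨h1, h2⟩)
        · exact Or.inl h
        · exact Or.inr ⟨Or.inr h1, h2⟩
      · rintro (h | ⟨(rfl | h1), h2⟩)
        · exact Or.inl h
        · exact absurd h2 (hac rfl)
        · exact Or.inr ⟨h1, h2⟩

theorem pv_nodup_inner (cells : PySem.Set (Int × Int)) (nbs : List (Int × Int)) :
    ∀ (nxt : PySem.Set (Int × Int)), nxt.Nodup →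
      (nbs.foldl
        (fun nxt nb => if PySem.Set.contains cells nb then PySem.Set.add nxt nb else nxt)
        nxt).Nodup := by
  induction nbs with
  | nil => intro nxt h; simpa using h
  | cons a l ih =>
    intro nxt h
    simp only [List.foldl_cons]
    by_cases ha : PySem.Set.contains cells a = true
    · simp only [ha, if_pos]; exact ih _ (PySem.Set.nodup_add _ _ h)
    · simp only [ha]; exact ih _ h

-- membership in one closure round
theorem pv_mem_round (cells r : PySem.Set (Int × Int)) (z : Int × Int) :
    z ∈ pvRound cells r ↔ z ∈ r ∨ ∃ c ∈ r, z ∈ pvNbrs c.1 c.2 ∧ z ∈ cells := by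
  unfold pvRound
  have main : ∀ (l : List (Int × Int)) (acc : PySem.Set (Int × Int)),
      (z ∈ l.foldl
          (fun nxt c =>
            (pvNbrs c.1 c.2).foldl
              (fun nxt nb => if PySem.Set.contains cells nb then PySem.Set.add nxt nb else nxt)
              nxt) acc
        ↔ z ∈ acc ∨ ∃ c ∈ l, z ∈ pvNbrs c.1 c.2 ∧ z ∈ cells) := by
    intro l
    induction l with
    | nil => simp
    | cons a t ih =>
      intro acc
      simp only [List.foldl_cons, ih, pv_mem_inner, List.mem_cons]
      constructor
      · rintro (⟨h | ⟨h1, h2⟩⟩ | ⟨c, hc, h1, h2⟩)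
        · exact Or.inl h
        · exact Or.inr ⟨a, Or.inl rfl, h1, h2⟩
        · exact Or.inr ⟨c, Or.inr hc, h1, h2⟩
      · rintro (h | ⟨c, (rfl | hc), h1, h2⟩)
        · exact Or.inl (Or.inl h)
        · exact Or.inl (Or.inr ⟨h1, h2⟩)
        · exact Or.inr ⟨c, hc, h1, h2⟩
  rw [main]
  simp [PySem.Set.mem_ofList]

theorem pv_nodup_round (cells r : PySem.Set (Int × Int)) : (pvRound cells r).Nodup := by
  unfold pvRound
  have main : ∀ (l : List (Int × Int)) (acc : PySem.Set (Int × Int)), acc.Nodup →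
      (l.foldl
        (fun nxt c =>
          (pvNbrs c.1 c.2).foldl
            (fun nxt nb => if PySem.Set.contains cells nb then PySem.Set.add nxt nb else nxt)
            nxt) acc).Nodup := by
    intro l
    induction l with
    | nil => intro acc h; simpa using h
    | cons a t ih =>
      intro acc h
      simp only [List.foldl_cons]
      exact ih _ (pv_nodup_inner cells _ _ h)
  exact main r _ (PySem.Set.nodup_ofList r)


-- ===== A-side: BFS invariant machinery =====

-- 'd is already discovered': its first index in arr is marked in visited
def PvDone (arr : List (Int × Int)) (vs : List Bool) (d : Int × Int) : Prop :=
  ∃ j, PySem.List.index? arr d = some j ∧ vs.getD j false = true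

def PvBase (arr : List (Int × Int)) (c0 : Int × Int) (vs : List Bool) : Prop :=
  vs.length = 7 ∧ vs.getD 0 false = true ∧
  ∀ i, vs.getD i false = true →
    ∃ c, PySem.List.index? arr c = some i ∧ PvReach arr c0 c

def PvInv (arr : List (Int × Int)) (c0 : Int × Int) (vs : List Bool)
    (q : List (Int × Int)) : Prop :=
  PvBase arr c0 vs ∧ (∀ c ∈ q, PvDone arr vs c) ∧
  (∀ i c, vs.getD i false = true → PySem.List.index? arr c = some i →
    c ∈ q ∨ ∀ d, PvStep arr c d → PvDone arr vs d)

def PvPost (arr : List (Int × Int)) (c0 : Int × Int) (vs : List Bool) : Prop :=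
  PvBase arr c0 vs ∧
  (∀ i c, vs.getD i false = true → PySem.List.index? arr c = some i →
    ∀ d, PvStep arr c d → PvDone arr vs d)

def PvM (vs : List Bool) (q : List (Int × Int)) : Nat := 5 * vs.count false + q.length

theorem pv_getD_set (l : List Bool) (i j : Nat) (a : Bool) (hi : i < l.length) :
    (l.set i a).getD j false = if i = j then a else l.getD j false := by
  simp only [List.getD_eq_getElem?_getD, List.getElem?_set]
  split_ifs with h1 <;> simp_all

theorem pv_count_set (l : List Bool) (i : Nat) (h : i < l.length) (hv : l[i] = false) :
    (l.set i true).count false + 1 = l.count false := by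
  induction l generalizing i with
  | nil => simp at h
  | cons a t ih =>
    cases i with
    | zero => simp_all
    | succ n =>
      simp only [List.set_cons_succ, List.count_cons]
      have := ih n (by simpa using h) (by simpa using hv)
      omega

theorem pv_index?_getElem (xs : List (Int × Int)) (i : Nat) (h : i < xs.length)
    (hn : xs.Nodup) : PySem.List.index? xs xs[i] = some i := by
  rw [PySem.List.index?_eq_some_iff]
  refine ⟨xs.take i, xs.drop (i + 1), ?_, by simp [h.le], ?_⟩
  · rw [List.getElem_cons_drop, List.take_append_drop]
  · intro hmem
    obtain ⟨j, hj, hji⟩ := List.getElem_of_mem hmem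
    rw [List.getElem_take] at hji
    have hjlen : j < i := by simp at hj; omega
    have := hn.getElem_inj_iff.1 hji
    omega

theorem pv_nbrs_eq (x y : Int) :
    (List.zip pvDx pvDy).map (fun e => (x + e.1, y + e.2)) = pvNbrs x y := by
  simp [pvDx, pvDy, pvNbrs, sub_eq_add_neg]

theorem pv_step_lemma (arr : List (Int × Int)) (c0 : Int × Int) (x y : Int) (d : Int × Int)
    (harr : arr.length ≤ 7) (st : List Bool × List (Int × Int))
    (hb : PvBase arr c0 st.1)
    (hq : ∀ c ∈ st.2, PvDone arr st.1 c)
    (hr : PvReach arr c0 (x, y))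
    (hd : (x + d.1, y + d.2) ∈ pvNbrs x y) :
    PvBase arr c0 (pvStepNb arr x y st d).1 ∧
    (∀ i, st.1.getD i false = true → (pvStepNb arr x y st d).1.getD i false = true) ∧
    (∀ c ∈ (pvStepNb arr x y st d).2, PvDone arr (pvStepNb arr x y st d).1 c) ∧
    st.2 ⊆ (pvStepNb arr x y st d).2 ∧
    ((x + d.1, y + d.2) ∈ arr → PvDone arr (pvStepNb arr x y st d).1 (x + d.1, y + d.2)) ∧
    (∀ i c, (pvStepNb arr x y st d).1.getD i false = true →
      PySem.List.index? arr c = some i →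
      st.1.getD i false = true ∨ c ∈ (pvStepNb arr x y st d).2) ∧
    PvM (pvStepNb arr x y st d).1 (pvStepNb arr x y st d).2 ≤ PvM st.1 st.2 := by
  obtain ⟨hlen, h0, hsound⟩ := hb
  unfold pvStepNb
  by_cases hmem : (x + d.1, y + d.2) ∈ arr
  case neg =>
    simp only [hmem, if_false]
    exact ⟨⟨hlen, h0, hsound⟩, fun i h => h, hq, fun c h => h,
      fun h => h.elim, fun i c h _ => Or.inl h, le_refl _⟩
  case pos =>
    have hsome : (PySem.List.index? arr (x + d.1, y + d.2)).isSome = true :=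
      (PySem.List.index?_isSome_iff arr _).2 hmem
    obtain ⟨idx, hidx⟩ := Option.isSome_iff_exists.1 hsome
    obtain ⟨hidxlt, hget, hfirst⟩ := PySem.List.getElem_of_index?_eq_some hidx
    have hidx7 : idx < st.1.length := by omega
    simp only [hmem, if_pos, hidx]
    by_cases hv : st.1.getD idx false = true
    case pos =>
      simp only [hv, if_pos]
      exact ⟨⟨hlen, h0, hsound⟩, fun i h => h, hq, fun c h => h,
        fun _ => ⟨idx, hidx, hv⟩, fun i c h _ => Or.inl h, le_refl _⟩
    case neg =>
      have hvf : st.1.getD idx false = false := by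
        simpa using hv
      rw [if_neg hv]
      constructor
      · refine ⟨by simpa using hlen, ?_, ?_⟩
        · rw [pv_getD_set _ _ _ _ hidx7]
          split_ifs with h <;> simp_all
        · intro i hi
          rw [pv_getD_set _ _ _ _ hidx7] at hi
          by_cases hii : idx = i
          · subst hii
            exact ⟨(x + d.1, y + d.2), hidx,
              Relation.ReflTransGen.tail hr ⟨hd, hmem⟩⟩
          · rw [if_neg hii] at hi
            exact hsound i hi
      refine ⟨?_, ?_, ?_, ?_, ?_, ?_⟩
      · intro i hi
        rw [pv_getD_set _ _ _ _ hidx7]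
        split_ifs with h <;> simp_all
      · intro c hc
        simp only [List.mem_append, List.mem_singleton] at hc
        rcases hc with hc | rfl
        · obtain ⟨j, hj1, hj2⟩ := hq c hc
          refine ⟨j, hj1, ?_⟩
          rw [pv_getD_set _ _ _ _ hidx7]
          split_ifs with h <;> simp_all
        · refine ⟨idx, hidx, ?_⟩
          rw [pv_getD_set _ _ _ _ hidx7, if_pos rfl]
      · intro c hc; simp [hc]
      · intro _
        refine ⟨idx, hidx, ?_⟩
        rw [pv_getD_set _ _ _ _ hidx7, if_pos rfl]
      · intro i c hi hic
        by_cases hii : idx = i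
        · subst hii
          obtain ⟨hlt2, hget2, _⟩ := PySem.List.getElem_of_index?_eq_some hic
          right
          simp only [List.mem_append, List.mem_singleton]
          right
          rw [← hget, ← hget2]
        · rw [pv_getD_set _ _ _ _ hidx7, if_neg hii] at hi
          exact Or.inl hi
      · unfold PvM
        have hcount : (st.1.set idx true).count false + 1 = st.1.count false := by
          apply pv_count_set st.1 idx hidx7
          have := List.getD_eq_getElem st.1 false hidx7
          simp_all
        simp only [List.length_append, List.length_singleton]
        omega


theorem pv_process (arr : List (Int × Int)) (c0 : Int × Int) (x y : Int)
    (harr : arr.length ≤ 7) :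
    ∀ (ds : List (Int × Int)) (st : List Bool × List (Int × Int)),
      PvBase arr c0 st.1 →
      (∀ c ∈ st.2, PvDone arr st.1 c) →
      PvReach arr c0 (x, y) →
      (∀ i c, st.1.getD i false = true → PySem.List.index? arr c = some i →
        c ∈ st.2 ∨ ∀ d', PvStep arr c d' →
          (PvDone arr st.1 d' ∨ ∃ e ∈ ds, d' = (x + e.1, y + e.2))) →
      (∀ e ∈ ds, (x + e.1, y + e.2) ∈ pvNbrs x y) →
      PvInv arr c0 (ds.foldl (pvStepNb arr x y) st).1 (ds.foldl (pvStepNb arr x y) st).2 ∧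
      PvM (ds.foldl (pvStepNb arr x y) st).1 (ds.foldl (pvStepNb arr x y) st).2 ≤
        PvM st.1 st.2 := by
  intro ds
  induction ds with
  | nil =>
    intro st hb hq hr hp _
    refine ⟨⟨hb, hq, ?_⟩, le_refl _⟩
    intro i c hi hic
    rcases hp i c hi hic with h | h
    · exact Or.inl h
    · refine Or.inr fun d hd => ?_
      rcases h d hd with h2 | ⟨e, he, _⟩
      · exact h2
      · exact absurd he (List.not_mem_nil)
  | cons e t ih =>
    intro st hb hq hr hp hds
    obtain ⟨hb1, hmono, hq1, hsub, hdone, hnew, hM1⟩ :=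
      pv_step_lemma arr c0 x y e harr st hb hq hr (hds e List.mem_cons_self)
    simp only [List.foldl_cons]
    have hdone_mono : ∀ d', PvDone arr st.1 d' → PvDone arr (pvStepNb arr x y st e).1 d' := by
      rintro d' ⟨j, hj1, hj2⟩
      exact ⟨j, hj1, hmono j hj2⟩
    have := ih (pvStepNb arr x y st e) hb1 hq1 hr ?_ (fun e' he' => hds e' (List.mem_cons_of_mem _ he'))
    · exact ⟨this.1, le_trans this.2 hM1⟩
    · intro i c hi hic
      rcases hnew i c hi hic with hold | hnow
      · rcases hp i c hold hic with hcq | hcl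
        · exact Or.inl (hsub hcq)
        · refine Or.inr fun d' hd' => ?_
          rcases hcl d' hd' with h2 | ⟨e', he', rfl⟩
          · exact Or.inl (hdone_mono _ h2)
          · rcases List.mem_cons.1 he' with rfl | he't
            · exact Or.inl (hdone hd'.2)
            · exact Or.inr ⟨e', he't, rfl⟩
      · exact Or.inl hnow

theorem pv_bfs_post (arr : List (Int × Int)) (c0 : Int × Int) (harr : arr.length ≤ 7) :
    ∀ (fuel : Nat) (vs : List Bool) (q : List (Int × Int)),
      PvInv arr c0 vs q → PvM vs q ≤ fuel → PvPost arr c0 (pvBfs arr fuel vs q)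
  := by
  intro fuel
  induction fuel with
  | zero =>
    intro vs q ⟨hb, hq, hp⟩ hM
    have hq0 : q = [] := by
      have : q.length = 0 := by unfold PvM at hM; omega
      exact List.eq_nil_of_length_eq_zero this
    subst hq0
    refine ⟨hb, fun i c hi hic d hd => ?_⟩
    rcases hp i c hi hic with h | h
    · exact absurd h (List.not_mem_nil)
    · exact h d hd
  | succ f ihf =>
    intro vs q hinv hM
    obtain ⟨hb, hq, hp⟩ := hinv
    match q with
    | [] =>
      refine ⟨hb, fun i c hi hic d hd => ?_⟩
      rcases hp i c hi hic with h | h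
      · exact absurd h (List.not_mem_nil)
      · exact h d hd
    | (x, y) :: rest =>
      show PvPost arr c0
        (pvBfs arr f ((List.zip pvDx pvDy).foldl (pvStepNb arr x y) (vs, rest)).1
          ((List.zip pvDx pvDy).foldl (pvStepNb arr x y) (vs, rest)).2)
      have hr : PvReach arr c0 (x, y) := by
        obtain ⟨j, hj1, hj2⟩ := hq (x, y) List.mem_cons_self
        obtain ⟨c', hc'1, hc'2⟩ := hb.2.2 j hj2
        obtain ⟨hlt1, hget1, _⟩ := PySem.List.getElem_of_index?_eq_some hj1
        obtain ⟨hlt2, hget2, _⟩ := PySem.List.getElem_of_index?_eq_some hc'1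
        rwa [← hget2, hget1] at hc'2
      have hproc := pv_process arr c0 x y harr (List.zip pvDx pvDy) (vs, rest) hb
        (fun c hc => hq c (List.mem_cons_of_mem _ hc)) hr ?_ ?_
      · refine ihf _ _ hproc.1 ?_
        have heq : PvM vs ((x, y) :: rest) = PvM vs rest + 1 := by
          unfold PvM; simp only [List.length_cons]; omega
        have h2 : PvM (List.foldl (pvStepNb arr x y) (vs, rest) (pvDx.zip pvDy)).1
            (List.foldl (pvStepNb arr x y) (vs, rest) (pvDx.zip pvDy)).2 ≤ PvM vs rest :=
          hproc.2
        omega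
      · intro i c hi hic
        rcases hp i c hi hic with hcq | hcl
        · rcases List.mem_cons.1 hcq with rfl | hcr
          · refine Or.inr fun d' hd' => Or.inr ?_
            obtain ⟨hd'1, _⟩ := hd'
            rw [← pv_nbrs_eq x y] at hd'1
            obtain ⟨e, he, heq⟩ := List.mem_map.1 hd'1
            exact ⟨e, he, heq.symm⟩
          · exact Or.inl hcr
        · exact Or.inr fun d' hd' => Or.inl (hcl d' hd')
      · intro e he
        rw [← pv_nbrs_eq x y]
        exact List.mem_map_of_mem he


theorem pv_complete (arr : List (Int × Int)) (c0 : Int × Int) (vs : List Bool)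
    (h : PvPost arr c0 vs) (hhead : PySem.List.index? arr c0 = some 0) :
    ∀ c, PvReach arr c0 c → PvDone arr vs c := by
  intro c hr
  induction hr with
  | refl => exact ⟨0, hhead, h.1.2.1⟩
  | tail hab hbc ih =>
    obtain ⟨j, hj1, hj2⟩ := ih
    exact h.2 j _ hj2 hj1 _ hbc

theorem pv_nodup_length_le {l m : List (Int × Int)} (hl : l.Nodup) (h : ∀ x ∈ l, x ∈ m) :
    l.length ≤ m.length := (List.subperm_of_subset hl h).length_le

theorem pv_nodup_mem_iff {l m : List (Int × Int)} (hl : l.Nodup) (h : ∀ x ∈ l, x ∈ m)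
    (hlen : m.length ≤ l.length) : ∀ x, x ∈ l ↔ x ∈ m :=
  fun _ => ((List.subperm_of_subset hl h).perm_of_length_le hlen).mem_iff

theorem pv_exists_dup (l : List (Int × Int)) (h : ¬ l.Nodup) :
    ∃ i j, ∃ hi : i < l.length, ∃ hj : j < l.length, i < j ∧ l[i] = l[j] := by
  rw [List.nodup_iff_injective_getElem] at h
  simp only [Function.Injective] at h
  push_neg at h
  obtain ⟨⟨a, ha⟩, ⟨b, hb⟩, heq, hne⟩ := h
  rcases Nat.lt_or_ge a b with hl | hl
  · exact ⟨a, b, ha, hb, hl, heq⟩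
  · have hba : b < a := by
      rcases Nat.lt_or_ge b a with h2 | h2
      · exact h2
      · exact absurd (by omega : a = b) (by simpa using hne)
    exact ⟨b, a, hb, ha, hba, heq.symm⟩

-- ===== VERDICT (by name: the statement is the Claim_ definition above) =====
theorem check_spec : Claim_equal_check := by
  intro arr _hdom hpre
  obtain ⟨hne, hlen7⟩ := hpre
  unfold Spec_check
  cases arr with
  | nil => exact absurd rfl hne
  | cons c0 t =>
  have hlen : (c0 :: t).length ≤ 7 := hlen7
  have h0idx : PySem.List.index? (c0 :: t) c0 = some 0 := PySem.List.index?_cons_self c0 t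
  have hlit : (List.replicate 7 false).set 0 true =
      [true, false, false, false, false, false, false] := rfl
  have hv0 : ∀ i, ((List.replicate 7 false).set 0 true).getD i false = true → i = 0 := by
    intro i hi
    rcases i with _ | _ | _ | _ | _ | _ | _ | i
    · rfl
    all_goals simp [List.getD_eq_getElem?_getD] at hi
  have hinv : PvInv (c0 :: t) c0 ((List.replicate 7 false).set 0 true) [c0] := by
    refine ⟨⟨rfl, rfl, ?_⟩, ?_, ?_⟩
    · intro i hi
      have hi0 := hv0 i hi; subst hi0
      exact ⟨c0, h0idx, Relation.ReflTransGen.refl⟩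
    · intro c hc
      rcases List.mem_singleton.1 hc with rfl
      exact ⟨0, h0idx, rfl⟩
    · intro i c hi hic
      have hi0 := hv0 i hi; subst hi0
      obtain ⟨hlt, hget, _⟩ := PySem.List.getElem_of_index?_eq_some hic
      left
      simp only [List.getElem_cons_zero] at hget
      exact List.mem_singleton.2 hget.symm
  have hM0 : PvM ((List.replicate 7 false).set 0 true) [c0] ≤ 40 := by
    have hc6 : List.count false ((List.replicate 7 false).set 0 true) = 6 := rfl
    unfold PvM
    rw [hc6]
    simp
  have hpost := pv_bfs_post (c0 :: t) c0 hlen 40 _ _ hinv hM0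
  set vsF := pvBfs (c0 :: t) 40 ((List.replicate 7 false).set 0 true) [c0] with hvsF
  have hA : check (c0 :: t) = !(vsF.contains false) := rfl
  obtain ⟨⟨hlenF, h0F, hsound⟩, hclosed⟩ := hpost
  have hcomp := pv_complete (c0 :: t) c0 vsF ⟨⟨hlenF, h0F, hsound⟩, hclosed⟩ h0idx
  set cells := PySem.Set.ofList (c0 :: t) with hcells
  set R : Nat → PySem.Set (Int × Int) :=
    fun k => (List.range k).foldl (fun r _ => pvRound cells r) (PySem.Set.ofList [c0]) with hR
  have hB : check_alt (c0 :: t) =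
      if (c0 :: t).length ≠ 7 ∨ cells.length ≠ 7 then false else ((R 6).length == 7) := rfl
  have hRsucc : ∀ k, R (k + 1) = pvRound cells (R k) := by
    intro k; simp [hR, List.range_succ]
  have hR0 : R 0 = [c0] := rfl
  have hcellsmem : ∀ z, z ∈ cells ↔ z ∈ (c0 :: t) := by
    intro z; rw [hcells]; exact PySem.Set.mem_ofList _ _
  have hRprops : ∀ k, (R k).Nodup ∧ c0 ∈ R k ∧
      ∀ z ∈ R k, z ∈ (c0 :: t) ∧ PvReach (c0 :: t) c0 z := by
    intro k
    induction k with
    | zero =>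
      refine ⟨by rw [hR0]; exact List.nodup_singleton c0, by rw [hR0]; exact List.mem_singleton.2 rfl, ?_⟩
      intro z hz
      rw [hR0] at hz
      rcases List.mem_singleton.1 hz with rfl
      exact ⟨List.mem_cons_self, Relation.ReflTransGen.refl⟩
    | succ k ih =>
      obtain ⟨hnd, hc0, hsnd⟩ := ih
      rw [hRsucc k]
      refine ⟨pv_nodup_round cells (R k), (pv_mem_round cells (R k) c0).2 (Or.inl hc0), ?_⟩
      intro z hz
      rcases (pv_mem_round cells (R k) z).1 hz with hz2 | ⟨c, hc, hnb, hcz⟩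
      · exact hsnd z hz2
      · have hzarr : z ∈ (c0 :: t) := (hcellsmem z).1 hcz
        exact ⟨hzarr, Relation.ReflTransGen.tail (hsnd c hc).2 ⟨hnb, hzarr⟩⟩
  have hRmono : ∀ k, ∀ z ∈ R k, z ∈ R (k + 1) := by
    intro k z hz; rw [hRsucc k]; exact (pv_mem_round cells (R k) z).2 (Or.inl hz)
  by_cases hg : (c0 :: t).length = 7 ∧ (c0 :: t).Nodup
  · obtain ⟨hg7, hgnd⟩ := hg
    have hcells_eq : cells = c0 :: t := by
      rw [hcells]; exact PySem.Set.ofList_eq_self_of_nodup _ hgnd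
    have hcond : ¬((c0 :: t).length ≠ 7 ∨ cells.length ≠ 7) := by
      rw [hcells_eq]; simp [hg7]
    rw [hB, if_neg hcond, hA]
    have hstep_to : ∀ k, ∀ c ∈ R k, ∀ d, PvStep (c0 :: t) c d → d ∈ R (k + 1) := by
      intro k c hc d hd
      rw [hRsucc k]
      exact (pv_mem_round cells (R k) d).2 (Or.inr ⟨c, hc, hd.1, (hcellsmem d).2 hd.2⟩)
    have hclosed_of_eq : ∀ k, (R (k + 1)).length ≤ (R k).length →
        ∀ z, z ∈ R (k + 1) ↔ z ∈ R k := by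
      intro k hk z
      exact (pv_nodup_mem_iff (hRprops k).1 (hRmono k) hk z).symm
    have hC6 : ∀ c ∈ R 6, ∀ d, PvStep (c0 :: t) c d → d ∈ R 6 := by
      by_cases hex : ∃ k, k < 6 ∧ (R (k + 1)).length ≤ (R k).length
      · obtain ⟨k, hk6, hkeq⟩ := hex
        have hstab : ∀ m, k ≤ m → ∀ z, z ∈ R m ↔ z ∈ R k := by
          intro m
          induction m with
          | zero =>
            intro h0 z
            have hk0 : k = 0 := Nat.le_zero.1 h0
            subst hk0; exact Iff.rfl
          | succ m ihm =>
            intro hkm z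
            rcases Nat.lt_or_ge k (m + 1) with hltk | hgek
            · have ihm' := ihm (by omega)
              rw [hRsucc m]
              constructor
              · intro hz
                rcases (pv_mem_round cells (R m) z).1 hz with hz2 | ⟨c, hc, hnb, hcz⟩
                · exact (ihm' z).1 hz2
                · have hcK := (ihm' c).1 hc
                  have hz1 : z ∈ R (k + 1) :=
                    hstep_to k c hcK z ⟨hnb, (hcellsmem z).1 hcz⟩
                  exact (hclosed_of_eq k hkeq z).1 hz1
              · intro hz
                exact (pv_mem_round cells (R m) z).2 (Or.inl ((ihm' z).2 hz))
            · have hkm1 : k = m + 1 := by omega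
              subst hkm1; exact Iff.rfl
        intro c hc d hd
        have hcK := (hstab 6 (by omega) c).1 hc
        have hdK1 : d ∈ R (k + 1) := hstep_to k c hcK d hd
        have hdK : d ∈ R k := (hclosed_of_eq k hkeq d).1 hdK1
        exact (hstab 6 (by omega) d).2 hdK
      · push_neg at hex
        have hlt : ∀ k, k < 6 → (R k).length < (R (k + 1)).length := by
          intro k hk
          have := hex k hk; omega
        have h60 : (R 0).length = 1 := by rw [hR0]; rfl
        have h1 : (R 0).length < (R 1).length := hlt 0 (by omega)
        have h2 : (R 1).length < (R 2).length := hlt 1 (by omega)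
        have h3 : (R 2).length < (R 3).length := hlt 2 (by omega)
        have h4 : (R 3).length < (R 4).length := hlt 3 (by omega)
        have h5 : (R 4).length < (R 5).length := hlt 4 (by omega)
        have h6 : (R 5).length < (R 6).length := hlt 5 (by omega)
        have h7 : 7 ≤ (R 6).length := by omega
        have hsub : ∀ z ∈ R 6, z ∈ (c0 :: t) := fun z hz => ((hRprops 6).2.2 z hz).1
        have hmem_iff := pv_nodup_mem_iff (hRprops 6).1 hsub (by omega)
        intro c hc d hd
        exact (hmem_iff d).2 hd.2
    have hcompB : ∀ z, PvReach (c0 :: t) c0 z → z ∈ R 6 := by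
      intro z hz
      induction hz with
      | refl => exact (hRprops 6).2.1
      | tail hab hbc ih => exact hC6 _ ih _ hbc
    by_cases hall : ∀ c ∈ (c0 :: t), PvReach (c0 :: t) c0 c
    · have hBlen : (R 6).length = 7 := by
        have hsub : ∀ z ∈ R 6, z ∈ (c0 :: t) := fun z hz => ((hRprops 6).2.2 z hz).1
        have hle := pv_nodup_length_le (hRprops 6).1 hsub
        have hge := pv_nodup_length_le hgnd (fun z hz => hcompB z (hall z hz))
        omega
      have hAval : vsF.contains false = false := by
        cases hcf : vsF.contains false with
        | false => rfl
        | true =>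
          exfalso
          have hmemF : false ∈ vsF := List.contains_iff_mem.1 hcf
          obtain ⟨i, hi, hveq⟩ := List.mem_iff_getElem.1 hmemF
          have hiarr : i < (c0 :: t).length := by omega
          have hidx := pv_index?_getElem (c0 :: t) i hiarr hgnd
          obtain ⟨j, hj1, hj2⟩ := hcomp ((c0 :: t)[i]) (hall _ (List.getElem_mem hiarr))
          rw [hidx] at hj1
          have hji : j = i := by injection hj1 with h; omega
          subst hji
          rw [List.getD_eq_getElem vsF false hi, hveq] at hj2
          exact Bool.false_ne_true hj2
      rw [hAval, hBlen]
      rfl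
    · push_neg at hall
      obtain ⟨c, hcarr, hcnr⟩ := hall
      have hBval : ((R 6).length == 7) = false := by
        apply beq_eq_false_iff_ne.2
        intro hBlen
        have hsub : ∀ z ∈ R 6, z ∈ (c0 :: t) := fun z hz => ((hRprops 6).2.2 z hz).1
        have hmem_iff := pv_nodup_mem_iff (hRprops 6).1 hsub (by omega)
        exact hcnr ((hRprops 6).2.2 c ((hmem_iff c).2 hcarr)).2
      have hAval : vsF.contains false = true := by
        obtain ⟨i, hi, hceq⟩ := List.getElem_of_mem hcarr
        have hidx := pv_index?_getElem (c0 :: t) i hi hgnd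
        rw [hceq] at hidx
        have hvF : vsF.getD i false = false := by
          cases hv : vsF.getD i false with
          | false => rfl
          | true =>
            exfalso
            obtain ⟨c', hc'1, hc'2⟩ := hsound i hv
            obtain ⟨hlt', hget', _⟩ := PySem.List.getElem_of_index?_eq_some hc'1
            rw [hceq] at hget'
            rw [hget'] at hcnr
            exact hcnr hc'2
        have hi7 : i < 7 := by omega
        apply List.contains_iff_mem.2
        rw [List.mem_iff_getElem]
        refine ⟨i, by omega, ?_⟩
        rw [← List.getD_eq_getElem vsF false (by omega)]
        exact hvF
      rw [hAval, hBval]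
      rfl
  · have hcond : (c0 :: t).length ≠ 7 ∨ cells.length ≠ 7 := by
      by_cases h7 : (c0 :: t).length = 7
      · right
        intro hc7
        apply hg
        refine ⟨h7, ?_⟩
        have hnd : cells.Nodup := by rw [hcells]; exact PySem.Set.nodup_ofList _
        have hsub : ∀ x ∈ cells, x ∈ (c0 :: t) := fun x hx => (hcellsmem x).1 hx
        have hperm := (List.subperm_of_subset hnd hsub).perm_of_length_le (by omega)
        exact hperm.nodup_iff.1 hnd
      · exact Or.inl h7
    rw [hB, if_pos hcond, hA]
    have hAval : vsF.contains false = true := by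
      rcases Nat.lt_or_ge (c0 :: t).length 7 with hl7 | hge7
      · have h6v : vsF.getD 6 false = false := by
          cases hv : vsF.getD 6 false with
          | false => rfl
          | true =>
            exfalso
            obtain ⟨c', hc'1, _⟩ := hsound 6 hv
            obtain ⟨hlt', _, _⟩ := PySem.List.getElem_of_index?_eq_some hc'1
            omega
        apply List.contains_iff_mem.2
        rw [List.mem_iff_getElem]
        refine ⟨6, by omega, ?_⟩
        rw [← List.getD_eq_getElem vsF false (by omega)]
        exact h6v
      · have h7 : (c0 :: t).length = 7 := by omega
        have hnnd : ¬(c0 :: t).Nodup := fun hnd => hg ⟨h7, hnd⟩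
        obtain ⟨i, j, hi, hj, hij, heq⟩ := pv_exists_dup _ hnnd
        have hjF : vsF.getD j false = false := by
          cases hv : vsF.getD j false with
          | false => rfl
          | true =>
            exfalso
            obtain ⟨c', hc'1, _⟩ := hsound j hv
            obtain ⟨hlt', hget', hfirst'⟩ := PySem.List.getElem_of_index?_eq_some hc'1
            exact hfirst' i hij (by rw [heq]; exact hget')
        apply List.contains_iff_mem.2
        rw [List.mem_iff_getElem]
        refine ⟨j, by omega, ?_⟩
        rw [← List.getD_eq_getElem vsF false (by omega)]
        exact hjF
    rw [hAval]
    rfl
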